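-- pv_equiv track=rewrite | github.com/kkw-11/Problem_Solving | Programmers/모의고사.py | solution
-- ===== SOURCE A (Python) =====
-- def solution(answers):
--     answer = []
--     n = len(answers)
--     student1_answer = [1, 2, 3, 4, 5]
--     student2_answer = [2, 1, 2, 3, 2, 4, 2, 5]
--     student3_answer = [3, 3, 1, 1, 2, 2, 4, 4, 5, 5]
--
--     len_student1_answer = len(student1_answer)
--     len_student2_answer = len(student2_answer)
--     len_student3_answer = len(student3_answer)
--
--     count1 = 0
--     count2 = 0
--     count3 = 0
--
--     for question_number in range(len(answers)):
--         if answers[question_number] == student1_answer[question_number%len_student1_answer]: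
--             count1 += 1
--         if answers[question_number] == student2_answer[question_number%len_student2_answer]:
--             count2 += 1
--         if answers[question_number] == student3_answer[question_number%len_student3_answer]:
--             count3 += 1
--
--     answer_count = [count1, count2, count3]
--     max_answer_count = max(answer_count)
--     for person, score in enumerate(answer_count):
--         if score == max_answer_count:
--             answer.append(person+1)
--
--     return answer
-- ===== SOURCE B (Python) =====
-- def solution(answers):
--     # Histogram approach: the three patterns are cyclic with lengths 5, 8, 10,
--     # all dividing 40, so a question's pattern answers depend only on its index mod 40.
--     # One pass builds a table cnt[(i % 40, answer)]; each score is then read off the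
--     # 40 residue classes without rescanning answers.
--     cnt = {}
--     for i, a in enumerate(answers):
--         k = (i % 40, a)
--         cnt[k] = cnt.get(k, 0) + 1
--     patterns = [[1, 2, 3, 4, 5],
--                 [2, 1, 2, 3, 2, 4, 2, 5],
--                 [3, 3, 1, 1, 2, 2, 4, 4, 5, 5]]
--     scores = [sum(cnt.get((r, p[r % len(p)]), 0) for r in range(40)) for p in patterns]
--     best = max(scores)
--     return [i + 1 for i, s in enumerate(scores) if s == best]
-- ===== Notes on version B (the rewrite author's own statement) =====
-- stated objective: alternative
-- what changed: Replaces A's per-question comparison loop against the three cyclic patterns by a histogram: one pass builds a dict keyed by (index mod 40, answer) (40 = lcm of the pattern lengths), and each student's score is then read off the 40 residue classes of the table without rescanning answers.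
import Mathlib
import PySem

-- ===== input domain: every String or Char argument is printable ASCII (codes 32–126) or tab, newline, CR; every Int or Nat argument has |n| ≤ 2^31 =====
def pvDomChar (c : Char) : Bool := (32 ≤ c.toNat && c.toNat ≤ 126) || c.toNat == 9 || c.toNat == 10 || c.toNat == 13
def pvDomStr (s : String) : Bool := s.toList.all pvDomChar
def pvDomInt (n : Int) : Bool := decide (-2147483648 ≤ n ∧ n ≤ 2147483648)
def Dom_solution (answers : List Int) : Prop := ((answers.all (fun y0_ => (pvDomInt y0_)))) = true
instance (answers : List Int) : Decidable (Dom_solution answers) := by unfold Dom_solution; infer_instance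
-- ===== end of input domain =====

-- B replaces A's per-question comparison loop by a histogram keyed by (index mod 40, answer)
-- (40 = lcm of the three pattern lengths); each score is read off the 40 residue classes. Same cost, different algorithm.

-- ===== PORT A =====
def solution (answers : List Int) : List Int :=
  let n : Int := (answers.length : Int)
  let student1_answer : List Int := [1, 2, 3, 4, 5]
  let student2_answer : List Int := [2, 1, 2, 3, 2, 4, 2, 5]
  let student3_answer : List Int := [3, 3, 1, 1, 2, 2, 4, 4, 5, 5]
  let len1 : Int := (student1_answer.length : Int)
  let len2 : Int := (student2_answer.length : Int)
  let len3 : Int := (student3_answer.length : Int)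
  let counts : Int × Int × Int :=
    (PySem.List.pyRange 0 n 1).foldl (fun c q =>
      (if PySem.List.pyGetD answers q 0 = PySem.List.pyGetD student1_answer (PySem.Int.mod q len1) 0 then c.1 + 1 else c.1,
       if PySem.List.pyGetD answers q 0 = PySem.List.pyGetD student2_answer (PySem.Int.mod q len2) 0 then c.2.1 + 1 else c.2.1,
       if PySem.List.pyGetD answers q 0 = PySem.List.pyGetD student3_answer (PySem.Int.mod q len3) 0 then c.2.2 + 1 else c.2.2))
      (0, 0, 0)
  let answer_count : List Int := [counts.1, counts.2.1, counts.2.2]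
  -- max(answer_count): the list is a nonempty literal, so Python's max never raises; getD 0 is unreachable
  let max_answer_count : Int := (PySem.List.max? answer_count id).getD 0
  (PySem.List.enumerate answer_count 0).foldl
    (fun ans ps => if ps.2 = max_answer_count then ans ++ [ps.1 + 1] else ans) []

-- ===== PORT B =====
def solution_alt (answers : List Int) : List Int :=
  -- cnt[(i % 40, a)] += 1 over enumerate(answers)
  let cnt : PySem.Dict (Int × Int) Int :=
    (PySem.List.enumerate answers 0).foldl
      (fun d ia => d.insert (PySem.Int.mod ia.1 40, ia.2) (d.getD (PySem.Int.mod ia.1 40, ia.2) 0 + 1))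
      PySem.Dict.empty
  let patterns : List (List Int) := [[1, 2, 3, 4, 5], [2, 1, 2, 3, 2, 4, 2, 5], [3, 3, 1, 1, 2, 2, 4, 4, 5, 5]]
  -- sum(cnt.get((r, p[r % len(p)]), 0) for r in range(40))
  let scores : List Int := patterns.map (fun p =>
    ((PySem.List.pyRange 0 40 1).map (fun r =>
        cnt.getD (r, PySem.List.pyGetD p (PySem.Int.mod r (p.length : Int)) 0) 0)).sum)
  let best : Int := (PySem.List.max? scores id).getD 0
  ((PySem.List.enumerate scores 0).filter (fun is => decide (is.2 = best))).map (fun is => is.1 + 1)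

-- ===== PRECONDITION & SPEC =====
def Spec_solution (answers : List Int) (out : List Int) : Prop := out = solution_alt answers
instance (answers : List Int) (out : List Int) : Decidable (Spec_solution answers out) := by unfold Spec_solution; infer_instance

-- ===== CLAIM (what is proved, stated in full; the proofs are below) =====
def Claim_equal_solution : Prop := ∀ (answers : List Int), Dom_solution answers → Spec_solution answers (solution answers)

-- ===== LEMMAS AND PROOFS =====

-- A's single loop carries three counters at once; split it into three independent counts.
theorem foldl_split3 {α : Type} (P1 P2 P3 : α → Prop) [DecidablePred P1] [DecidablePred P2] [DecidablePred P3]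
    (l : List α) (c1 c2 c3 : Int) :
    l.foldl (fun (c : Int × Int × Int) x =>
      (if P1 x then c.1 + 1 else c.1,
       if P2 x then c.2.1 + 1 else c.2.1,
       if P3 x then c.2.2 + 1 else c.2.2)) (c1, c2, c3)
    = (c1 + (l.countP (fun x => decide (P1 x)) : Int),
       c2 + (l.countP (fun x => decide (P2 x)) : Int),
       c3 + (l.countP (fun x => decide (P3 x)) : Int)) := by
  induction l generalizing c1 c2 c3 with
  | nil => simp
  | cons x xs ih =>
    simp only [List.foldl_cons, List.countP_cons, ih]
    split_ifs <;> simp_all <;> omega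

-- the counter dict looked up at a key = count of the matching elements among the generated keys
theorem cnt_getD (l : List (Int × Int)) (d : PySem.Dict (Int × Int) Int) (k : Int × Int) :
    (l.foldl
      (fun d ia => d.insert (PySem.Int.mod ia.1 40, ia.2) (d.getD (PySem.Int.mod ia.1 40, ia.2) 0 + 1))
      d).getD k 0
    = d.getD k 0 + ((l.countP (fun ia => (PySem.Int.mod ia.1 40, ia.2) == k)) : Int) := by
  induction l generalizing d with
  | nil => simp
  | cons x xs ih =>
    rw [List.foldl_cons, ih, List.countP_cons, PySem.Dict.getD_insert]
    by_cases hk : k = (PySem.Int.mod x.1 40, x.2)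
    · subst hk
      rw [if_pos rfl]
      simp only [beq_self_eq_true, if_true]
      push_cast
      omega
    · rw [if_neg hk]
      have hb : ((PySem.Int.mod x.1 40, x.2) == k) = false := by
        rw [beq_eq_false_iff_ne]
        exact fun h => hk h.symm
      rw [hb]
      simp

-- countP of 'r = r0 ∧ c r' over a nodup list: at most the single element r0 counts
theorem countP_unique (R : List Int) (hR : R.Nodup) (r0 : Int) (c : Int → Bool) :
    R.countP (fun r => decide (r0 = r) && c r) = if r0 ∈ R ∧ c r0 then 1 else 0 := by
  induction R with
  | nil => simp
  | cons x xs ih =>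
    rcases List.nodup_cons.mp hR with ⟨hx, hxs⟩
    rw [List.countP_cons, ih hxs]
    by_cases hx0 : r0 = x
    · subst hx0
      by_cases hc : c r0 <;> simp [hc, hx]
    · by_cases hm : r0 ∈ xs <;> by_cases hc : c r0 <;> simp [hx0, hm, hc]
-- swap the two summations: sum over r of per-r counts = sum over elements of per-element counts
theorem sum_map_countP {α β : Type} (R : List α) (l : List β) (p : α → β → Bool) :
    (R.map (fun r => (l.countP (p r) : Int))).sum
    = (l.map (fun x => (R.countP (fun r => p r x) : Int))).sum := by
  induction l with
  | nil => simp
  | cons x xs ih =>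
    have : ∀ r, (List.countP (p r) (x :: xs) : Int)
        = (List.countP (p r) xs : Int) + (if p r x then 1 else 0) := by
      intro r; rw [List.countP_cons]; push_cast; split_ifs <;> simp
    simp only [List.map_cons, List.sum_cons]
    rw [List.map_congr_left (fun r _ => this r), PySem.List.sum_map_add_int, ih]
    have h2 : (R.map (fun r => if p r x then (1 : Int) else 0)).sum
        = (R.countP (fun r => p r x) : Int) := PySem.List.sum_map_ite_one_zero (fun r => p r x) R
    omega

-- per-element: exactly one residue class matches, and it matches iff the answer matches the pattern
theorem point_count (p : List Int) (hlen : 0 < p.length) (hdvd : ((p.length : Int)) ∣ 40)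
    (i a : Int) :
    ((PySem.List.pyRange 0 40 1).countP
        (fun r => (PySem.Int.mod i 40, a) == (r, PySem.List.pyGetD p (PySem.Int.mod r (p.length : Int)) 0)))
    = if a = PySem.List.pyGetD p (PySem.Int.mod i (p.length : Int)) 0 then 1 else 0 := by
  have hpred : ∀ r ∈ PySem.List.pyRange 0 40 1,
      ((PySem.Int.mod i 40, a) == (r, PySem.List.pyGetD p (PySem.Int.mod r (p.length : Int)) 0)) = true
      ↔ (decide (PySem.Int.mod i 40 = r) && decide (a = PySem.List.pyGetD p (PySem.Int.mod r (p.length : Int)) 0)) = true := by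
    intro r _
    simp [Prod.ext_iff]
  rw [List.countP_congr hpred, countP_unique _ (PySem.List.nodup_pyRange_one 0 40)]
  have hmem : PySem.Int.mod i 40 ∈ PySem.List.pyRange 0 40 1 := by
    rw [PySem.List.mem_pyRange_one]
    exact ⟨PySem.Int.mod_nonneg i (by norm_num), PySem.Int.mod_lt i (by norm_num)⟩
  have hLpos : (0 : Int) < (p.length : Int) := by exact_mod_cast hlen
  have hmm : PySem.Int.mod (PySem.Int.mod i 40) (p.length : Int) = PySem.Int.mod i (p.length : Int) := by
    rw [PySem.Int.mod_eq_emod_of_pos (by norm_num : (0:Int) < 40),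
        PySem.Int.mod_eq_emod_of_pos hLpos, PySem.Int.mod_eq_emod_of_pos hLpos]
    exact Int.emod_emod_of_dvd i hdvd
  simp only [hmem, true_and, hmm]
  split_ifs with h <;> simp_all

-- B's histogram score for a pattern = the direct count over enumerate(answers)
theorem score_eq (answers p : List Int) (hlen : 0 < p.length) (hdvd : ((p.length : Int)) ∣ 40) :
    ((PySem.List.pyRange 0 40 1).map (fun r =>
        ((PySem.List.enumerate answers 0).foldl
          (fun d ia => d.insert (PySem.Int.mod ia.1 40, ia.2) (d.getD (PySem.Int.mod ia.1 40, ia.2) 0 + 1))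
          (PySem.Dict.empty : PySem.Dict (Int × Int) Int)).getD
          (r, PySem.List.pyGetD p (PySem.Int.mod r (p.length : Int)) 0) 0)).sum
    = (((PySem.List.enumerate answers 0).countP
        (fun ia => decide (ia.2 = PySem.List.pyGetD p (PySem.Int.mod ia.1 (p.length : Int)) 0))) : Int) := by
  have h1 : ∀ r ∈ PySem.List.pyRange 0 40 1,
      ((PySem.List.enumerate answers 0).foldl
          (fun d ia => d.insert (PySem.Int.mod ia.1 40, ia.2) (d.getD (PySem.Int.mod ia.1 40, ia.2) 0 + 1))
          (PySem.Dict.empty : PySem.Dict (Int × Int) Int)).getD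
          (r, PySem.List.pyGetD p (PySem.Int.mod r (p.length : Int)) 0) 0
      = (((PySem.List.enumerate answers 0).countP
          (fun ia => (PySem.Int.mod ia.1 40, ia.2) == (r, PySem.List.pyGetD p (PySem.Int.mod r (p.length : Int)) 0))) : Int) := by
    intro r _
    rw [cnt_getD]
    simp
  rw [List.map_congr_left h1, sum_map_countP]
  have h2 : ∀ ia ∈ PySem.List.enumerate answers 0,
      (((PySem.List.pyRange 0 40 1).countP
          (fun r => (PySem.Int.mod ia.1 40, ia.2) == (r, PySem.List.pyGetD p (PySem.Int.mod r (p.length : Int)) 0))) : Int)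
      = (if (fun ia : Int × Int => decide (ia.2 = PySem.List.pyGetD p (PySem.Int.mod ia.1 (p.length : Int)) 0)) ia then (1:Int) else 0) := by
    intro ia hia
    rcases (PySem.List.mem_enumerate_iff _ _ _).mp hia with ⟨k, hk, rfl⟩
    rw [point_count p hlen hdvd]
    split_ifs with h h' <;> simp_all
  rw [List.map_congr_left h2, PySem.List.sum_map_ite_one_zero]

-- B's per-pattern count over enumerate equals A's count over the index range.
theorem count_pattern_eq (answers p : List Int) :
    ((PySem.List.enumerate answers 0).countP
        (fun ia => decide (ia.2 = PySem.List.pyGetD p (PySem.Int.mod ia.1 (p.length : Int)) 0)))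
    = (PySem.List.pyRange 0 (answers.length : Int) 1).countP
        (fun q => decide (PySem.List.pyGetD answers q 0 = PySem.List.pyGetD p (PySem.Int.mod q (p.length : Int)) 0)) := by
  rw [PySem.List.enumerate_eq_map_pyRange answers 0, List.countP_map]
  simp [PySem.List.len_eq, Function.comp_def]

-- selecting the winners from the three scores: A's append loop = B's filter-then-map
theorem final_eq (k1 k2 k3 : Int) :
    (PySem.List.enumerate [k1, k2, k3] 0).foldl
        (fun ans ps => if ps.2 = (PySem.List.max? [k1, k2, k3] id).getD 0 then ans ++ [ps.1 + 1] else ans) ([] : List Int)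
    = ((PySem.List.enumerate [k1, k2, k3] 0).filter
        (fun is => decide (is.2 = (PySem.List.max? [k1, k2, k3] id).getD 0))).map (fun is => is.1 + 1) := by
  generalize (PySem.List.max? [k1, k2, k3] id).getD 0 = m
  simp only [PySem.List.enumerate_cons, PySem.List.enumerate_nil, List.foldl, List.filter]
  split_ifs <;> simp_all

-- ===== VERDICT (by name: the statement is the Claim_ definition above) =====
theorem solution_spec : Claim_equal_solution := by
  intro answers _
  unfold Spec_solution solution solution_alt
  dsimp only
  rw [foldl_split3]
  simp only [List.map_cons, List.map_nil, zero_add]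
  simp only [score_eq answers [1,2,3,4,5] (by norm_num) (by norm_num),
      score_eq answers [2,1,2,3,2,4,2,5] (by norm_num) (by norm_num),
      score_eq answers [3,3,1,1,2,2,4,4,5,5] (by norm_num) (by norm_num),
      count_pattern_eq]
  exact (final_eq _ _ _).symm ▸ rfl
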